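-- pv_equiv track=rewrite | github.com/mini-ops996/VirulentHunter | utils.py | AA_replace
-- ===== SOURCE A (Python) =====
-- AA_list = ('G','A','V','L','I','P','F','Y','W','R'
--            'S','T','C','M','N','Q','D','E','K','H')
--
-- def AA_replace(seq):
--     odd_AAs = set()
--     for s in seq:
--         if s not in AA_list:
--             odd_AAs.add(s)
--     for k in odd_AAs:
--         seq = seq.replace(k,'X')
--     return seq
-- ===== SOURCE B (Python) =====
-- def AA_replace(seq):
--     # A's tuple's actual single-character elements: the missing comma in
--     # 'R' 'S' makes the element 'RS', which never equals a single character,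
--     # so R and S are (per A's behaviour) treated as non-standard too.
--     kept = 'GAVLIPFYWTCMNQDEKH'
--     return ''.join(c if c in kept else 'X' for c in seq)
-- ===== Notes on version B (the rewrite author's own statement) =====
-- stated objective: faster
-- what changed: B replaces A's two-phase strategy (collect the distinct non-standard characters into a set, then run one full str.replace pass over the string per collected character) by a single left-to-right pass mapping each character directly to itself or 'X' against the 18 single-char elements A's tuple actually contains (its 'RS' element, a missing-comma artefact, never matches a single character).
import Mathlib
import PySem

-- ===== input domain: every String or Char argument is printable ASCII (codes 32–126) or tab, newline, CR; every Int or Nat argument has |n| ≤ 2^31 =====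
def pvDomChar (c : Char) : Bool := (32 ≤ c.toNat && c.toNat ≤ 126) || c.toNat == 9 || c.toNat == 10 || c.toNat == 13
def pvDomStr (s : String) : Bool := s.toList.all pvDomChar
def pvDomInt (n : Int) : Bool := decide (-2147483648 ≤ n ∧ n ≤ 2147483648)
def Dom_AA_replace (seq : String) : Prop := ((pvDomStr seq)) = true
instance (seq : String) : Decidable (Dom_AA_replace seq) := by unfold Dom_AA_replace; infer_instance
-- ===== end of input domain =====

-- B: single left-to-right pass mapping each char to itself or 'X' (against the 18
-- single-char elements A's tuple actually contains), instead of A's collect-a-set-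
-- of-odd-chars-then-one-full-str.replace-pass-per-char strategy; simpler, same result.


-- ===== PORT A =====
-- AA_list with A's missing-comma quirk: 'R' 'S' concatenates to the element "RS".
def pvAAlist : List String :=
  ["G", "A", "V", "L", "I", "P", "F", "Y", "W", "RS", "T", "C", "M", "N", "Q", "D", "E", "K", "H"]

-- Literal port of A: collect distinct non-member chars into a set, then replace each
-- with "X".  (Python iterates the set in hash order; the result is order-independent
-- because the replacements of distinct characters by 'X' commute.)
def AA_replace (seq : String) : String :=
  let odd : PySem.Set Char :=
    seq.toList.foldl
      (fun acc s => if ¬ (String.ofList [s] ∈ pvAAlist) then PySem.Set.add acc s else acc)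
      PySem.Set.empty
  odd.foldl (fun sq k => PySem.Str.replace sq (String.ofList [k]) "X") seq

-- ===== PORT B =====
def pvKept : List Char :=
  ['G', 'A', 'V', 'L', 'I', 'P', 'F', 'Y', 'W', 'T', 'C', 'M', 'N', 'Q', 'D', 'E', 'K', 'H']

-- Literal port of B: one pass, map each character.
def AA_replace_alt (seq : String) : String :=
  String.ofList (seq.toList.map (fun c => if c ∈ pvKept then c else 'X'))

-- ===== PRECONDITION & SPEC =====
def Spec_AA_replace (seq : String) (out : String) : Prop := out = AA_replace_alt seq
instance (seq : String) (out : String) : Decidable (Spec_AA_replace seq out) := by unfold Spec_AA_replace; infer_instance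

-- ===== CLAIM (what is proved, stated in full; the proofs are below) =====
def Claim_equal_AA_replace : Prop := ∀ (seq : String), Dom_AA_replace seq → Spec_AA_replace seq (AA_replace seq)

-- ===== LEMMAS AND PROOFS =====

-- replace.go with a single-character pattern is a pointwise map (fuel ≥ length).
theorem pv_go_single (k x : Char) :
    ∀ (fuel : Nat) (l acc : List Char), l.length ≤ fuel →
      PySem.Chars.replace.go [k] [x] fuel l acc =
        acc.reverse ++ l.map (fun c => if c = k then x else c) := by
  intro fuel
  induction fuel with
  | zero =>
      intro l acc h
      have : l = [] := List.eq_nil_of_length_eq_zero (Nat.le_zero.mp h)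
      subst this
      simp [PySem.Chars.replace.go]
  | succ n ih =>
      intro l acc h
      cases l with
      | nil => simp [PySem.Chars.replace.go]
      | cons c t =>
          rw [PySem.Chars.replace.go]
          by_cases hc : c = k
          · subst hc
            have hpre : [c].isPrefixOf (c :: t) = true := by simp [List.isPrefixOf]
            simp only [hpre, if_pos]
            rw [ih _ _ (by simpa using Nat.le_of_succ_le_succ h)]
            simp
          · have hpre : [k].isPrefixOf (c :: t) = false := by
              simp [List.isPrefixOf]
              intro h'; exact absurd h'.symm hc
            simp only [hpre]
            rw [if_neg (by simp)]
            rw [ih _ _ (by simpa using Nat.le_of_succ_le_succ h)]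
            simp [hc]

-- str.replace with a single-character pattern is a pointwise map.
theorem pv_replace_single (k x : Char) (l : List Char) :
    PySem.Chars.replace l [k] [x] = l.map (fun c => if c = k then x else c) := by
  rw [PySem.Chars.replace]
  simp only [List.isEmpty_cons, Bool.false_eq_true, if_false]
  exact pv_go_single k x l.length l [] (le_refl _)

-- Folding single-char replacements over a list K of characters maps each character
-- of the string to 'X' iff it is in K.
theorem pv_fold_replace (K : List Char) :
    ∀ (l : List Char),
      (K.foldl (fun sq k => PySem.Str.replace sq (String.ofList [k]) "X") (String.ofList l)) =
        String.ofList (l.map (fun c => if c ∈ K then 'X' else c)) := by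
  induction K with
  | nil => intro l; simp
  | cons k K' ih =>
      intro l
      simp only [List.foldl_cons]
      have h1 : PySem.Str.replace (String.ofList l) (String.ofList [k]) "X" =
          String.ofList (l.map (fun c => if c = k then 'X' else c)) := by
        apply String.toList_injective
        rw [PySem.Str.toList_replace]
        simp only [String.toList_ofList]
        simpa using pv_replace_single k 'X' l
      rw [h1, ih]
      congr 1
      rw [List.map_map]
      apply List.map_congr_left
      intro c _
      by_cases hck : c = k
      · subst hck; by_cases hX : 'X' ∈ K' <;> simp [hX]
      · by_cases hK' : c ∈ K' <;> simp [hck, hK', Function.comp]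

-- Membership in the accumulated "odd" set.
theorem pv_mem_odd (l : List Char) :
    ∀ (acc : PySem.Set Char) (c : Char),
      (c ∈ l.foldl
        (fun acc s => if ¬ (String.ofList [s] ∈ pvAAlist) then PySem.Set.add acc s else acc) acc) ↔
      (c ∈ acc ∨ (c ∈ l ∧ ¬ (String.ofList [c] ∈ pvAAlist))) := by
  induction l with
  | nil => intro acc c; simp
  | cons s t ih =>
      intro acc c
      simp only [List.foldl_cons]
      by_cases hs : String.ofList [s] ∈ pvAAlist
      · rw [if_neg (by simpa using hs)]
        rw [ih]
        constructor
        · rintro (h | ⟨h1, h2⟩)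
          · exact Or.inl h
          · exact Or.inr ⟨List.mem_cons_of_mem _ h1, h2⟩
        · rintro (h | ⟨h1, h2⟩)
          · exact Or.inl h
          · rcases List.mem_cons.mp h1 with rfl | h1
            · exact absurd hs h2
            · exact Or.inr ⟨h1, h2⟩
      · rw [if_pos (by simpa using hs)]
        rw [ih]
        simp only [PySem.Set.mem_add]
        constructor
        · rintro ((h | rfl) | ⟨h1, h2⟩)
          · exact Or.inl h
          · exact Or.inr ⟨List.mem_cons_self, hs⟩
          · exact Or.inr ⟨List.mem_cons_of_mem _ h1, h2⟩
        · rintro (h | ⟨h1, h2⟩)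
          · exact Or.inl (Or.inl h)
          · rcases List.mem_cons.mp h1 with rfl | h1
            · exact Or.inl (Or.inr rfl)
            · exact Or.inr ⟨h1, h2⟩

-- The single-char membership test against A's tuple equals membership in pvKept.
theorem pv_mem_AAlist (c : Char) : (String.ofList [c] ∈ pvAAlist) ↔ c ∈ pvKept := by
  simp only [pvAAlist, pvKept, List.mem_cons, List.not_mem_nil, or_false, String.ext_iff,
    String.toList_ofList]
  constructor
  · rintro (h | h | h | h | h | h | h | h | h | h | h | h | h | h | h | h | h | h | h) <;>
      simp_all
  · rintro (rfl | rfl | rfl | rfl | rfl | rfl | rfl | rfl | rfl | rfl | rfl | rfl | rfl |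
      rfl | rfl | rfl | rfl | rfl) <;> simp

-- ===== VERDICT (by name: the statement is the Claim_ definition above) =====
theorem AA_replace_spec : Claim_equal_AA_replace := by
  intro seq _
  unfold Spec_AA_replace AA_replace AA_replace_alt
  have hfold := pv_fold_replace
    (seq.toList.foldl
      (fun acc s => if ¬ (String.ofList [s] ∈ pvAAlist) then PySem.Set.add acc s else acc)
      PySem.Set.empty) seq.toList
  simp only []
  rw [show (String.ofList seq.toList) = seq from String.ofList_toList] at hfold
  rw [hfold]
  congr 1
  apply List.map_congr_left
  intro c hc
  by_cases hk : c ∈ pvKept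
  · rw [if_neg, if_pos hk]
    rw [pv_mem_odd]
    push Not
    refine ⟨by simp [PySem.Set.empty], fun _ => ?_⟩
    simpa using (pv_mem_AAlist c).mpr hk
  · rw [if_pos, if_neg hk]
    rw [pv_mem_odd]
    exact Or.inr ⟨hc, fun h => hk ((pv_mem_AAlist c).mp h)⟩
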